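-- pv_equiv track=rewrite | github.com/kkashleva/SemChangeDetection | models/extract_embeddings.py | check_for_split_tokens_bert
-- ===== SOURCE A (Python) =====
-- def check_for_split_tokens_bert(tokens: list[str]):
--     """Here we analyze a tokenized line and scan it for split words (for example, [ab, ##bauen]).
--     We glue such words together and memorize their indices in the original tokenized line."""
--     tokens_with_indexes = []
--     current_index = len(tokens) - 1
--     # We move in reverse direction, from the last token to the first one
--     while current_index >= 0:
--         current_token = tokens[current_index]
--         if not current_token.startswith('##'):
--             # Then it's not a split word, we just add it to the result with its index
--             tokens_with_indexes.append((current_token, [current_index]))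
--             current_index -= 1
--         else:
--             # It's a split word. We are now standing at the tail of this word
--             token_indexes = [current_index]  # First we add the tail index of this word to the list
--             full_token = current_token.strip('##')  # Then we strip the word part of "##" and add this part to a string
--             sub_index = current_index - 1  # Move one step towards the beginning of the line (and the head of the word)
--             while tokens[sub_index].startswith('##'):
--                 # The word can be split into multiple parts.
--                 # This loop runs only if the word is split in more than two parts
--                 # This loop processes all middle parts of the word (non-head and non-tail)
--                 full_token = tokens[sub_index].strip('##') + full_token  # glue the part to the front of the word
--                 token_indexes.append(sub_index)
--                 sub_index -= 1
--             # Finally we process the head of the split word. It doesn't have "##"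
--             full_token = tokens[sub_index] + full_token
--             token_indexes.append(sub_index)
--             token_indexes.reverse()  # Because we moved from the tail towards the head (done mostly for convenience)
--             tokens_with_indexes.append((full_token, token_indexes))
--             current_index = sub_index - 1
--     tokens_with_indexes.reverse()  # Also for convenience
--     return tokens_with_indexes
-- ===== SOURCE B (Python) =====
-- def check_for_split_tokens_bert(tokens: list[str]):
--     """Forward single pass: extend the last group in place for '##' continuations."""
--     result = []
--     for i, tok in enumerate(tokens):
--         if tok.startswith('##'):
--             prev, idxs = result[-1]
--             result[-1] = (prev + tok.strip('##'), idxs + [i])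
--         else:
--             result.append((tok, [i]))
--     return result
-- ===== Notes on version B (the rewrite author's own statement) =====
-- stated objective: simpler
-- what changed: Single forward pass with enumerate that appends a fresh (token,[i]) group or extends the last group in place for '##' tokens, instead of A's backward outer loop with a nested backward inner scan and two list reversals.
-- outside the precondition, e.g. on check_for_split_tokens_bert(['##a', 'b']): A returns [('ba', [-1, 0]), ('b', [1])], B raises IndexError; on check_for_split_tokens_bert(['##a']): A raises IndexError, B raises IndexError
import Mathlib
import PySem

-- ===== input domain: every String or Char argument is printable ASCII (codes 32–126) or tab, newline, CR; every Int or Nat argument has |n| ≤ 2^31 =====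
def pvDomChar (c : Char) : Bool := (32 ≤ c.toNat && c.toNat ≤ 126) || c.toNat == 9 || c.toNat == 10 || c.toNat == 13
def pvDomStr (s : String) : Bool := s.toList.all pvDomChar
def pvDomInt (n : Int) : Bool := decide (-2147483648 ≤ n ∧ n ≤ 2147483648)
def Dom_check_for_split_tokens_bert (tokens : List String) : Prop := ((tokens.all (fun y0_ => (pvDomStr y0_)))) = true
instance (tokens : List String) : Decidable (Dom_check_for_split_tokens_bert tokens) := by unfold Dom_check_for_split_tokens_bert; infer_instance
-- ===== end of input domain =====

-- B is a single forward pass (append a fresh group, or extend the last group in place for '##'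
-- tokens) replacing A's backward outer loop with nested backward inner scan and two reversals.

-- ===== PORT A =====
-- A's inner 'while tokens[sub_index].startswith("##")' loop, plus the head glue and append that
-- follow it; returns (full_token, token_indexes before the .reverse(), final sub_index).
-- pyGet? = none is Python's IndexError (A raises there; such inputs are outside Pre_);
-- fuel only makes the loop total, it never runs out on inputs where A terminates.
def innerA (tokens : List String) (sub : Int) (full : String) (idxs : List Int) : Nat → String × List Int × Int
  | 0 => (full, idxs, sub)
  | fuel+1 =>
    match PySem.List.pyGet? tokens sub with
    | none => (full, idxs, sub)
    | some t =>
      if PySem.Str.startswith t "##" then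
        innerA tokens (sub - 1) (PySem.Str.stripChars t "##" ++ full) (idxs ++ [sub]) fuel
      else
        (t ++ full, idxs ++ [sub], sub)

-- A's outer 'while current_index >= 0' loop; appends groups to acc as Python appends to the list.
def outerA (tokens : List String) : Int → List (String × List Int) → Nat → List (String × List Int)
  | _, acc, 0 => acc
  | ci, acc, fuel+1 =>
    if ci < 0 then acc
    else
      match PySem.List.pyGet? tokens ci with
      | none => acc
      | some t =>
        if PySem.Str.startswith t "##" then
          let r := innerA tokens (ci - 1) (PySem.Str.stripChars t "##") [ci] fuel
          outerA tokens (r.2.2 - 1) (acc ++ [(r.1, r.2.1.reverse)]) fuel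
        else
          outerA tokens (ci - 1) (acc ++ [(t, [ci])]) fuel

def check_for_split_tokens_bert (tokens : List String) : List (String × List Int) :=
  (outerA tokens ((tokens.length : Int) - 1) [] (tokens.length + 1)).reverse

-- ===== PORT B =====
-- one step of Source B's for loop; pyGet? acc (-1) = result[-1] (none = IndexError, outside Pre_)
def stepB (acc : List (String × List Int)) (i : Int) (tok : String) : List (String × List Int) :=
  if PySem.Str.startswith tok "##" then
    match PySem.List.pyGet? acc (-1) with
    | none => acc
    | some (prev, idxs) => acc.dropLast ++ [(prev ++ PySem.Str.stripChars tok "##", idxs ++ [i])]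
  else acc ++ [(tok, [i])]

def check_for_split_tokens_bert_alt (tokens : List String) : List (String × List Int) :=
  (PySem.List.enumerate tokens 0).foldl (fun acc p => stepB acc p.1 p.2) []

-- ===== PRECONDITION & SPEC =====
-- Pre_ excludes lists whose first token starts with '##': there A's backward scan underflows into
-- Python negative-index wraparound (an accidental value with negative indices, or an IndexError),
-- and B's forward pass raises IndexError on result[-1].
def Pre_check_for_split_tokens_bert (tokens : List String) : Prop :=
  tokens.head?.all (fun t => !PySem.Str.startswith t "##") = true
instance (tokens : List String) : Decidable (Pre_check_for_split_tokens_bert tokens) := by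
  unfold Pre_check_for_split_tokens_bert; infer_instance

def pvWitness_check_for_split_tokens_bert : List String := ["ab", "##bauen", "x"]

def Spec_check_for_split_tokens_bert (tokens : List String) (out : List (String × List Int)) : Prop := out = check_for_split_tokens_bert_alt tokens
instance (tokens : List String) (out : List (String × List Int)) : Decidable (Spec_check_for_split_tokens_bert tokens out) := by unfold Spec_check_for_split_tokens_bert; infer_instance

-- ===== CLAIM (what is proved, stated in full; the proofs are below) =====
def Claim_equal_check_for_split_tokens_bert : Prop := ∀ (tokens : List String), Dom_check_for_split_tokens_bert tokens → Pre_check_for_split_tokens_bert tokens → Spec_check_for_split_tokens_bert tokens (check_for_split_tokens_bert tokens)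

-- ===== LEMMAS AND PROOFS =====

def strip2 (t : String) : String := PySem.Str.stripChars t "##"

def pTok (t : String) : Bool := PySem.Str.startswith t "##"

def idxsI (s : Int) : Nat → List Int
  | 0 => []
  | m+1 => s :: idxsI (s+1) m

def glueL (h : String) (hs : List String) : String := hs.foldl (fun a t => a ++ strip2 t) h

theorem idxsI_cons (s : Int) (m : Nat) : idxsI s (m+1) = s :: idxsI (s+1) m := rfl

theorem idxsI_snoc (m : Nat) : ∀ s : Int, idxsI s (m+1) = idxsI s m ++ [s + (m : Int)] := by
  induction m with
  | zero => intro s; simp [idxsI]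
  | succ k ih => intro s
                 show s :: idxsI (s+1) (k+1) = (s :: idxsI (s+1) k) ++ [s + ((k:Int)+1)]
                 rw [ih (s+1)]
                 simp; ring

theorem B_ext (hs : List String) : ∀ (acc : List (String × List Int)) (g : String × List Int) (s : Int),
    (∀ x ∈ hs, pTok x = true) →
    (PySem.List.enumerate hs s).foldl (fun acc p => stepB acc p.1 p.2) (acc ++ [g])
      = acc ++ [(glueL g.1 hs, g.2 ++ idxsI s hs.length)] := by
  induction hs with
  | nil => intro acc g s _; simp [PySem.List.enumerate_nil, glueL, idxsI]
  | cons x xs ih =>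
    intro acc g s hall
    have hx : pTok x = true := hall x (by simp)
    simp only [PySem.List.enumerate_cons, List.foldl_cons]
    have hstep : stepB (acc ++ [g]) s x
        = acc ++ [(g.1 ++ strip2 x, g.2 ++ [s])] := by
      simp [stepB, pTok] at hx ⊢
      rw [hx]
      simp [PySem.List.pyGet?_neg_one_append_singleton, strip2]
    rw [hstep, ih acc (g.1 ++ strip2 x, g.2 ++ [s]) (s+1) (fun y hy => hall y (by simp [hy]))]
    simp only [glueL, List.foldl_cons, List.length_cons]
    rw [idxsI_cons]
    simp

theorem B_block (h : String) (hs : List String) (acc : List (String × List Int)) (s : Int)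
    (hh : pTok h = false) (hhs : ∀ x ∈ hs, pTok x = true) :
    (PySem.List.enumerate (h :: hs) s).foldl (fun acc p => stepB acc p.1 p.2) acc
      = acc ++ [(glueL h hs, idxsI s (hs.length + 1))] := by
  simp only [PySem.List.enumerate_cons, List.foldl_cons]
  have hh' : PySem.Str.startswith h "##" = false := hh
  have hstep : stepB acc s h = acc ++ [(h, [s])] := by
    simp only [stepB, hh', Bool.false_eq_true, if_false]
  rw [hstep, B_ext hs acc (h, [s]) (s+1) hhs]
  rw [idxsI_cons]
  simp

theorem A_acc : ∀ (fuel : Nat) (tokens : List String) (ci : Int) (acc : List (String × List Int)),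
    outerA tokens ci acc fuel = acc ++ outerA tokens ci [] fuel := by
  intro fuel
  induction fuel with
  | zero => intro tokens ci acc; simp [outerA]
  | succ f ih =>
    intro tokens ci acc
    simp only [outerA]
    split
    · simp
    · cases hg : PySem.List.pyGet? tokens ci with
      | none => simp
      | some t =>
        simp only
        split
        · rw [ih, ih tokens _ ([] ++ _)]
          simp
        · rw [ih, ih tokens _ ([] ++ _)]
          simp

def glueR (hs : List String) (full : String) : String := hs.foldr (fun t a => strip2 t ++ a) full

theorem A_inner (h : String) (hh : pTok h = false) :
    ∀ (hs2 us extra : List String) (full : String) (idxs : List Int) (fuel : Nat),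
    (∀ x ∈ hs2, pTok x = true) → hs2.length < fuel →
    innerA (us ++ h :: (hs2 ++ extra)) ((us.length : Int) + hs2.length) full idxs fuel
      = (h ++ glueR hs2 full, idxs ++ (idxsI (us.length : Int) (hs2.length + 1)).reverse, (us.length : Int)) := by
  intro hs2
  induction hs2 using List.reverseRecOn with
  | nil =>
    intro us extra full idxs fuel _ hfuel
    obtain ⟨f, rfl⟩ : ∃ f, fuel = f + 1 := ⟨fuel - 1, by omega⟩
    simp only [List.length_nil, Nat.cast_zero, add_zero, List.nil_append]
    rw [innerA]
    rw [show PySem.List.pyGet? (us ++ h :: extra) (us.length : Int) = some h from by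
      simpa using PySem.List.pyGet?_append_length us extra h]
    simp [pTok] at hh
    simp [hh, glueR, idxsI]
  | append_singleton ys x ih =>
    intro us extra full idxs fuel hall hfuel
    obtain ⟨f, rfl⟩ : ∃ f, fuel = f + 1 := ⟨fuel - 1, by omega⟩
    have hx : pTok x = true := hall x (by simp)
    rw [innerA]
    have harr : (us.length : Int) + ((ys ++ [x]).length : Nat) = ((us ++ h :: ys).length : Int) := by
      simp; try push_cast; try ring
    rw [show us ++ h :: (ys ++ [x] ++ extra) = (us ++ h :: ys) ++ ([x] ++ extra) from by simp]
    rw [harr]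
    rw [show PySem.List.pyGet? ((us ++ h :: ys) ++ ([x] ++ extra)) ((us ++ h :: ys).length : Int) = some x from by
      simpa using PySem.List.pyGet?_append_length (us ++ h :: ys) extra x]
    simp only [pTok] at hx
    simp only [hx, if_true]
    rw [show ((us ++ h :: ys).length : Int) - 1 = (us.length : Int) + ys.length from by simp; try push_cast; try ring]
    rw [show (us ++ h :: ys) ++ ([x] ++ extra) = us ++ h :: (ys ++ ([x] ++ extra)) from by simp]
    rw [ih us ([x] ++ extra) (PySem.Str.stripChars x "##" ++ full)
        (idxs ++ [((us ++ h :: ys).length : Int)]) f (fun y hy => hall y (by simp [hy])) (by simp at hfuel ⊢; omega)]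
    refine congrArg₂ _ ?_ (congrArg₂ _ ?_ rfl)
    · simp [glueR, strip2]
    · rw [List.append_assoc]
      congr 1
      rw [show (ys ++ [x]).length + 1 = (ys.length + 1) + 1 from by simp]
      rw [idxsI_snoc (ys.length + 1) (us.length : Int)]
      simp

theorem decomp : ∀ (tokens : List String), tokens ≠ [] → pTok (tokens.headI) = false →
    ∃ us h hs, tokens = us ++ h :: hs ∧ pTok h = false ∧ (∀ x ∈ hs, pTok x = true) := by
  intro tokens
  induction tokens using List.reverseRecOn with
  | nil => intro hne _; exact absurd rfl hne
  | append_singleton ts x ih =>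
    intro _ hhead
    by_cases hx : pTok x = true
    · have hts : ts ≠ [] := by
        rintro rfl
        simp at hhead
        simp [pTok] at hhead
        simp [pTok, hhead] at hx
      obtain ⟨us, h, hs, heq, hh, hall⟩ := ih hts (by
        cases ts with
        | nil => exact absurd rfl hts
        | cons a l => simpa using hhead)
      exact ⟨us, h, hs ++ [x], by simp [heq], hh, by
        intro y hy
        rcases List.mem_append.mp hy with h1 | h2
        · exact hall y h1
        · simp at h2; subst h2; exact hx⟩
    · exact ⟨ts, x, [], by simp, by simpa using hx, by simp⟩

theorem glueL_eq (hs : List String) : ∀ h, glueL h hs = h ++ glueR hs "" := by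
  induction hs with
  | nil => intro h; simp [glueL, glueR]
  | cons x xs ih => intro h; simp only [glueL, List.foldl_cons, glueR, List.foldr_cons]
                    rw [show xs.foldl (fun a t => a ++ strip2 t) (h ++ strip2 x) = glueL (h ++ strip2 x) xs from rfl, ih]
                    simp [glueR, String.append_assoc]

theorem enumerate_append (us vs : List String) : ∀ (s : Int),
    PySem.List.enumerate (us ++ vs) s
      = PySem.List.enumerate us s ++ PySem.List.enumerate vs (s + us.length) := by
  induction us with
  | nil => intro s; simp [PySem.List.enumerate_nil]
  | cons x xs ih => intro s; simp [PySem.List.enumerate_cons, ih (s+1)]; ring_nf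

theorem main_lemma : ∀ (N : Nat) (tokens : List String), tokens.length ≤ N →
    tokens.head?.all (fun t => !PySem.Str.startswith t "##") = true →
    ∀ (extra : List String) (fuel : Nat), tokens.length < fuel →
    outerA (tokens ++ extra) ((tokens.length : Int) - 1) [] fuel
      = ((PySem.List.enumerate tokens 0).foldl (fun acc p => stepB acc p.1 p.2) []).reverse := by
  intro N
  induction N with
  | zero =>
    intro tokens hlen _ extra fuel hfuel
    have : tokens = [] := List.eq_nil_of_length_eq_zero (by omega)
    subst this
    obtain ⟨f, rfl⟩ : ∃ f, fuel = f + 1 := ⟨fuel - 1, by omega⟩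
    simp [outerA, PySem.List.enumerate_nil]
  | succ N ihN =>
    intro tokens hlen hpre extra fuel hfuel
    cases htok : tokens with
    | nil =>
      obtain ⟨f, rfl⟩ : ∃ f, fuel = f + 1 := ⟨fuel - 1, by omega⟩
      simp [outerA, PySem.List.enumerate_nil]
    | cons t0 rest =>
      subst htok
      have hhead : pTok (t0 :: rest).headI = false := by
        simp at hpre; simpa [pTok] using hpre
      obtain ⟨us, h, hs, heq, hh, hall⟩ := decomp _ (by simp) hhead
      -- Pre_ holds for us
      have hpreus : us.head?.all (fun t => !PySem.Str.startswith t "##") = true := by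
        cases hus : us with
        | nil => simp
        | cons u0 us' =>
          have : t0 = u0 := by rw [hus] at heq; exact (List.cons_eq_cons.mp heq.symm).1.symm
          simp at hpre
          simp [← this, hpre]
      rw [heq]
      obtain ⟨f, rfl⟩ : ∃ f, fuel = f + 1 := ⟨fuel - 1, by omega⟩
      have hl := congrArg List.length heq
      simp only [List.length_cons, List.length_append] at hl hlen hfuel
      have hlenus : us.length ≤ N := by omega
      have hflenus : us.length < f := by omega
      -- B side
      rw [enumerate_append us (h :: hs) 0, List.foldl_append]
      simp only [zero_add]
      rw [B_block h hs _ (us.length : Int) hh hall]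
      rcases List.eq_nil_or_concat hs with rfl | ⟨hs', t, rfl⟩
      · -- hs = []
        rw [outerA]
        have hci : ((us ++ h :: []).length : Int) - 1 = (us.length : Int) := by simp
        rw [hci, if_neg (by omega)]
        rw [show PySem.List.pyGet? (us ++ h :: [] ++ extra) (us.length : Int) = some h from by
          simpa using PySem.List.pyGet?_append_length us extra h]
        simp only [pTok] at hh
        simp only [hh, Bool.false_eq_true, if_false]
        rw [A_acc]
        rw [show us ++ h :: [] ++ extra = us ++ (h :: extra) from by simp]
        rw [ihN us hlenus hpreus (h :: extra) f hflenus]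
        simp [glueL, idxsI]
      · -- hs = hs' ++ [t]
        simp only [List.concat_eq_append] at heq hall hl ⊢
        have hls : hs'.length < f := by
          simp only [List.length_append, List.length_cons] at hl; omega
        have ht : pTok t = true := hall t (by simp)
        rw [outerA]
        have hci : ((us ++ h :: (hs' ++ [t])).length : Int) - 1 = ((us ++ h :: hs').length : Int) := by
          simp; push_cast; ring
        rw [hci, if_neg (by omega)]
        rw [show us ++ h :: (hs' ++ [t]) ++ extra = (us ++ h :: hs') ++ (t :: extra) from by simp]
        rw [PySem.List.pyGet?_append_length (us ++ h :: hs') extra t]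
        simp only [pTok] at ht
        simp only [ht, if_true]
        have hci2 : ((us ++ h :: hs').length : Int) - 1 = (us.length : Int) + hs'.length := by
          simp; push_cast; ring
        rw [hci2]
        rw [show (us ++ h :: hs') ++ (t :: extra) = us ++ h :: (hs' ++ ([t] ++ extra)) from by simp]
        rw [A_inner h hh hs' us ([t] ++ extra) (PySem.Str.stripChars t "##")
            [((us ++ h :: hs').length : Int)] f (fun y hy => hall y (by simp [hy])) hls]
        rw [A_acc]
        rw [show us ++ h :: (hs' ++ ([t] ++ extra)) = us ++ (h :: (hs' ++ ([t] ++ extra))) from rfl]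
        rw [ihN us hlenus hpreus _ f hflenus]
        simp only [List.reverse_append, List.reverse_cons, List.reverse_nil, List.nil_append,
          List.reverse_reverse, List.singleton_append, List.cons_append, List.append_nil]
        congr 2
        · rw [glueL_eq]
          simp [glueR, strip2]
        · rw [show (hs' ++ [t]).length + 1 = (hs'.length + 1) + 1 from by simp]
          rw [idxsI_snoc (hs'.length + 1) (us.length : Int)]
          simp
          try push_cast
          try ring

-- ===== VERDICT (by name: the statement is the Claim_ definition above) =====
theorem check_for_split_tokens_bert_spec : Claim_equal_check_for_split_tokens_bert := by
  intro tokens _ hpre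
  unfold Spec_check_for_split_tokens_bert check_for_split_tokens_bert check_for_split_tokens_bert_alt
  have := main_lemma tokens.length tokens le_rfl hpre [] (tokens.length + 1) (by omega)
  simp at this
  rw [this, List.reverse_reverse]
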